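-- pv_equiv track=rewrite | github.com/weightan/some-numerical-experiments | cubes.py | decomp_n
-- ===== SOURCE A (Python) =====
-- import math
--
-- arr_cubes  = [i for i in range(1, int(math.pow(177663375, 1/3)) + 4)]
--
-- def decomp_n(n):
--     arr_tripl = []
--
--
--     for x in arr_cubes:
--         if n - x**3 > 1:
--
--             for y in arr_cubes:
--                 if n - x**3 - y**3 > 0:
--                     for z in arr_cubes:
--                         if  x>=y and y>= z and n - x**3 - y**3 - z**3 == 0 :
--                             arr_tripl.append( (x, y, z) )
--
--     return arr_tripl
-- ===== SOURCE B (Python) =====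
-- import math
--
-- arr_cubes = [i for i in range(1, int(math.pow(177663375, 1/3)) + 4)]
--
-- def decomp_n(n):
--     cube_root = {i ** 3: i for i in arr_cubes}
--     res = []
--     for x in arr_cubes:
--         x3 = x ** 3
--         for y in range(1, x + 1):
--             r = n - x3 - y ** 3
--             if r > 0:
--                 z = cube_root.get(r)
--                 if z is not None and z <= y:
--                     res.append((x, y, z))
--     return res
-- ===== Notes on version B (the rewrite author's own statement) =====
-- stated objective: faster
-- what changed: Replaces A's innermost brute-force scan over all candidate z by a single lookup in a cube->root dictionary built once, and iterates y only up to x instead of filtering x>=y inside the loop.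
import Mathlib
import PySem

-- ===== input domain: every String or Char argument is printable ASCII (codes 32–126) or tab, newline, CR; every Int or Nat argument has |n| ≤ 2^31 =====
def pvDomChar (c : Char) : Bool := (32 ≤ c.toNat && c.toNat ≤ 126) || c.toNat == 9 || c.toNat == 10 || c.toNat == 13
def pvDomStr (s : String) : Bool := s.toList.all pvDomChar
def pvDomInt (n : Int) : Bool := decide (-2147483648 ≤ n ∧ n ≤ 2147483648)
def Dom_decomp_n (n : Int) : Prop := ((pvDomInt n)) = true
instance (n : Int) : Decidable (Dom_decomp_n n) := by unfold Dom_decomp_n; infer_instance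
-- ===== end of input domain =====

set_option maxRecDepth 4000


-- B replaces A's innermost brute-force scan for z by a single lookup in a cube→root dict built once
-- (objective: faster, O(K^3) → O(K^2) in the fixed bound K = 565 of arr_cubes).

-- ===== PORT A =====
-- module constant: arr_cubes = [i for i in range(1, int(math.pow(177663375, 1/3)) + 4)]
-- the float expression int(math.pow(177663375, 1/3)) evaluates (once, at import) to 562, so the range is range(1, 566)
def pvCubes : List Int := PySem.List.pyRange 1 566 1

def decomp_n (n : Int) : List (List Int) :=
  pvCubes.foldl (fun acc x =>
    if n - x ^ 3 > 1 then
      pvCubes.foldl (fun acc y =>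
        if n - x ^ 3 - y ^ 3 > 0 then
          pvCubes.foldl (fun acc z =>
            if x ≥ y ∧ y ≥ z ∧ n - x ^ 3 - y ^ 3 - z ^ 3 = 0 then acc ++ [[x, y, z]] else acc)
            acc
        else acc) acc
    else acc) []

-- ===== PORT B =====
-- the dict comprehension {i**3: i for i in arr_cubes}: the keys i**3 are pairwise distinct,
-- so the dict is exactly this association list in insertion order
def pvCubeDict : PySem.Dict Int Int := PySem.Dict.mk (pvCubes.map (fun i => (i ^ 3, i)))

def decomp_n_alt (n : Int) : List (List Int) :=
  pvCubes.foldl (fun acc x =>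
    -- Source B's local r = n - x3 - y**3 is inlined (used twice, unchanged)
    (PySem.List.pyRange 1 (x + 1) 1).foldl (fun acc y =>
      if n - x ^ 3 - y ^ 3 > 0 then
        match pvCubeDict.get? (n - x ^ 3 - y ^ 3) with
        | some z => if z ≤ y then acc ++ [[x, y, z]] else acc
        | none => acc
      else acc) acc) []

-- ===== PRECONDITION & SPEC =====
def Spec_decomp_n (n : Int) (out : List (List Int)) : Prop := out = decomp_n_alt n
instance (n : Int) (out : List (List Int)) : Decidable (Spec_decomp_n n out) := by unfold Spec_decomp_n; infer_instance

-- ===== CLAIM (what is proved, stated in full; the proofs are below) =====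
def Claim_equal_decomp_n : Prop := ∀ (n : Int), Dom_decomp_n n → Spec_decomp_n n (decomp_n n)

-- ===== LEMMAS AND PROOFS =====

-- a foldl whose body appends a pure function of the element is acc ++ flatMap
theorem pvFoldl_body_flatMap {α β : Type} (l : List α) (f : List β → α → List β)
    (g : α → List β) (h : ∀ acc x, f acc x = acc ++ g x) (acc : List β) :
    l.foldl f acc = acc ++ l.flatMap g := by
  induction l generalizing acc with
  | nil => simp
  | cons a t ih => simp [List.foldl_cons, h, ih, List.flatMap_cons, List.append_assoc]

theorem pvFlatMap_congr {α β : Type} (l : List α) (f g : α → List β)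
    (h : ∀ x ∈ l, f x = g x) : l.flatMap f = l.flatMap g := by
  induction l with
  | nil => rfl
  | cons a t ih => simp [List.flatMap_cons, h a (by simp), ih (fun x hx => h x (by simp [hx]))]

theorem pvCubeInj (a b : Int) (h : a ^ 3 = b ^ 3) : a = b :=
  (Odd.strictMono_pow (R := Int) (by norm_num)).injective h

-- the brute-force scan for the unique z with z³ = r equals the dict lookup
theorem pvKey (l : List Int) (hl : l.Nodup) (r y : Int) (e : Int → List (List Int)) :
    l.flatMap (fun z => if z ≤ y ∧ z ^ 3 = r then e z else [])
      = match (PySem.Dict.mk (l.map (fun i => (i ^ 3, i)))).get? r with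
        | some z => if z ≤ y then e z else []
        | none => [] := by
  induction l with
  | nil => simp [PySem.Dict.get?]
  | cons a t ih =>
    rcases List.nodup_cons.mp hl with ⟨ha, ht⟩
    rw [List.map_cons, PySem.Dict.get?_mk_cons]
    by_cases h : a ^ 3 = r
    · simp only [List.flatMap_cons, h, beq_self_eq_true, if_true]
      have htail : t.flatMap (fun z => if z ≤ y ∧ z ^ 3 = r then e z else []) = [] := by
        rw [List.flatMap_eq_nil_iff]
        intro z hz
        have : ¬ (z ≤ y ∧ z ^ 3 = r) := by
          rintro ⟨_, hz3⟩
          exact ha (pvCubeInj z a (by rw [hz3, h]) ▸ hz)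
        simp [this]
      rw [htail]
      by_cases hay : a ≤ y <;> simp [hay]
    · have hbeq : (a ^ 3 == r) = false := by simpa using h
      simp only [List.flatMap_cons, hbeq, if_neg (by simp [h] : ¬ (a ≤ y ∧ a ^ 3 = r))]
      simpa using ih ht

theorem pvCubes_nodup : pvCubes.Nodup := by
  unfold pvCubes; exact PySem.List.nodup_pyRange_one 1 566

theorem pvOneLeCube (y : Int) (hy : 1 ≤ y) : 1 ≤ y ^ 3 := one_le_pow₀ hy

-- normal form of port A
theorem pvA_eq (n : Int) :
    decomp_n n = pvCubes.flatMap (fun x =>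
      if n - x ^ 3 > 1 then
        pvCubes.flatMap (fun y =>
          if n - x ^ 3 - y ^ 3 > 0 then
            pvCubes.flatMap (fun z =>
              if x ≥ y ∧ y ≥ z ∧ n - x ^ 3 - y ^ 3 - z ^ 3 = 0 then [[x, y, z]] else [])
          else [])
      else []) := by
  unfold decomp_n
  rw [pvFoldl_body_flatMap _ _ _ ?h, List.nil_append]
  intro acc x
  split
  · rw [pvFoldl_body_flatMap _ _ _ ?h2]
    intro acc y
    split
    · rw [pvFoldl_body_flatMap _ _ _ ?h3]
      intro acc z
      split <;> simp
    · simp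
  · simp

-- normal form of port B
theorem pvB_eq (n : Int) :
    decomp_n_alt n = pvCubes.flatMap (fun x =>
      (PySem.List.pyRange 1 (x + 1) 1).flatMap (fun y =>
        if n - x ^ 3 - y ^ 3 > 0 then
          match pvCubeDict.get? (n - x ^ 3 - y ^ 3) with
          | some z => if z ≤ y then [[x, y, z]] else []
          | none => []
        else [])) := by
  unfold decomp_n_alt
  rw [pvFoldl_body_flatMap _ _ _ ?h, List.nil_append]
  intro acc x
  rw [pvFoldl_body_flatMap _ _ _ ?h2]
  intro acc y
  split_ifs with hr
  · cases pvCubeDict.get? (n - x ^ 3 - y ^ 3) with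
    | none => simp
    | some z => simp only []; split_ifs <;> simp
  · simp

-- ===== VERDICT (by name: the statement is the Claim_ definition above) =====
theorem decomp_n_spec : Claim_equal_decomp_n := by
  intro n _
  unfold Spec_decomp_n
  rw [pvA_eq, pvB_eq]
  apply pvFlatMap_congr
  intro x hx
  have hx' : 1 ≤ x ∧ x < 566 := (PySem.List.mem_pyRange_one).mp hx
  by_cases hguard : n - x ^ 3 > 1
  · rw [if_pos hguard]
    -- split A's y-scan at x+1; the tail (y > x) contributes nothing
    have hsplit : pvCubes = PySem.List.pyRange 1 (x + 1) 1 ++ PySem.List.pyRange (x + 1) 566 1 :=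
      PySem.List.pyRange_one_append 1 (x + 1) 566 (by omega) (by omega)
    set F : Int → List (List Int) := fun y =>
      if n - x ^ 3 - y ^ 3 > 0 then
        pvCubes.flatMap (fun z =>
          if x ≥ y ∧ y ≥ z ∧ n - x ^ 3 - y ^ 3 - z ^ 3 = 0 then [[x, y, z]] else [])
      else [] with hF
    conv_lhs => rw [hsplit]
    rw [List.flatMap_append]
    have htail : (PySem.List.pyRange (x + 1) 566 1).flatMap F = [] := by
      rw [List.flatMap_eq_nil_iff]
      intro y hy
      rw [hF]; dsimp only
      have hy' : x + 1 ≤ y ∧ y < 566 := (PySem.List.mem_pyRange_one).mp hy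
      have hz : pvCubes.flatMap (fun z =>
          if x ≥ y ∧ y ≥ z ∧ n - x ^ 3 - y ^ 3 - z ^ 3 = 0 then [[x, y, z]] else []) = [] := by
        rw [List.flatMap_eq_nil_iff]
        intro z _
        have : ¬ (x ≥ y ∧ y ≥ z ∧ n - x ^ 3 - y ^ 3 - z ^ 3 = 0) := by
          rintro ⟨h1, _⟩; omega
        simp [this]
      rw [hz]; split <;> rfl
    rw [htail, List.append_nil]
    apply pvFlatMap_congr
    intro y hy
    rw [hF]; dsimp only
    have hy' : 1 ≤ y ∧ y < x + 1 := (PySem.List.mem_pyRange_one).mp hy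
    by_cases hr : n - x ^ 3 - y ^ 3 > 0
    · rw [if_pos hr, if_pos hr]
      have hcond : (fun z => if x ≥ y ∧ y ≥ z ∧ n - x ^ 3 - y ^ 3 - z ^ 3 = 0
            then ([[x, y, z]] : List (List Int)) else [])
          = (fun z => if z ≤ y ∧ z ^ 3 = n - x ^ 3 - y ^ 3 then [[x, y, z]] else []) := by
        funext z
        apply if_congr _ rfl rfl
        constructor
        · rintro ⟨_, h2, h3⟩; exact ⟨h2, by linarith⟩
        · rintro ⟨h1, h2⟩; exact ⟨by omega, h1, by linarith⟩
      rw [hcond, show pvCubeDict = PySem.Dict.mk (pvCubes.map (fun i => (i ^ 3, i))) from rfl]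
      exact pvKey pvCubes pvCubes_nodup _ y _
    · rw [if_neg hr, if_neg hr]
  · rw [if_neg hguard]
    symm
    rw [List.flatMap_eq_nil_iff]
    intro y hy
    have hy' : 1 ≤ y ∧ y < x + 1 := (PySem.List.mem_pyRange_one).mp hy
    have : ¬ (n - x ^ 3 - y ^ 3 > 0) := by
      have := pvOneLeCube y hy'.1; omega
    rw [if_neg this]
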